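-- pv_equiv track=rewrite | github.com/PariaZ/interview-ai | src/indexing.py | paragraph_chunk
-- ===== SOURCE A (Python) =====
-- from typing import List, Dict
--
-- def paragraph_chunk(text: str, max_chars: int = 800) -> List[str]:
--     text = text.replace("\r\n", "\n").replace("\r", "\n").strip()
--     if not text:
--         return []
--
--     paragraphs = [p.strip() for p in text.split("\n\n") if p.strip()]
--     chunks: List[str] = []
--     current = ""
--
--     for p in paragraphs:
--         is_heading = p.startswith("## ") or p.startswith("### ")
--
--         # force a new chunk at each new heading (section boundary)
--         if is_heading and current.strip():
--             chunks.append(current.strip())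
--             current = ""
--
--         # normal size-based grouping
--         if len(current) + len(p) + 2 > max_chars:
--             if current.strip():
--                 chunks.append(current.strip())
--             current = p
--         else:
--             current = (current + "\n\n" + p).strip()
--
--     if current.strip():
--         chunks.append(current.strip())
--
--     return chunks
-- ===== SOURCE B (Python) =====
-- from typing import List
--
--
-- def _take_group(paras: List[str], length: int, max_chars: int):
--     """Longest prefix of paras that extends a group whose joined length is `length`;
--     returns (extension, remainder). A heading or a size overflow ends the group."""
--     for j, p in enumerate(paras):
--         if p.startswith("## ") or p.startswith("### ") or length + len(p) + 2 > max_chars: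
--             return paras[:j], paras[j:]
--         length += len(p) + 2
--     return paras, []
--
--
-- def paragraph_chunk(text: str, max_chars: int = 800) -> List[str]:
--     text = text.replace("\r\n", "\n").replace("\r", "\n").strip()
--     if not text:
--         return []
--
--     rest = [p.strip() for p in text.split("\n\n") if p.strip()]
--     chunks: List[str] = []
--     # Outer loop: each iteration emits exactly one chunk, by greedily taking the
--     # maximal prefix of the remaining paragraphs that fits behind the group's head.
--     while rest:
--         head, tail = rest[0], rest[1:]
--         ext, rest = _take_group(tail, len(head), max_chars)
--         chunks.append("\n\n".join([head] + ext))
--     return chunks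
-- ===== Notes on version B (the rewrite author's own statement) =====
-- stated objective: alternative
-- what changed: A makes one pass with a mutable string buffer and heading/size flush conditions; B instead uses a nested greedy decomposition: an outer loop that emits one chunk per iteration by calling a helper that takes the maximal prefix of the remaining paragraphs fitting behind the group's head, joining each group once.
import Mathlib
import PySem

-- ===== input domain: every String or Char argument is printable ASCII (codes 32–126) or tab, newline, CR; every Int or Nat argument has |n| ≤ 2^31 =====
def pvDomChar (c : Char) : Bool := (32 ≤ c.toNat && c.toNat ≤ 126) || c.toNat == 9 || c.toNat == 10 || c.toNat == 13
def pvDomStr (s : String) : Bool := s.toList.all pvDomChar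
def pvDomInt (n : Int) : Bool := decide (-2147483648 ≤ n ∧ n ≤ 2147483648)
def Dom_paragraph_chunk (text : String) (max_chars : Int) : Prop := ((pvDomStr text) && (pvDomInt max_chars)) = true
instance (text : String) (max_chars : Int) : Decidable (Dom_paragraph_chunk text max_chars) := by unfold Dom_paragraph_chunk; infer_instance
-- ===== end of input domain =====

-- B replaces A's single pass with a mutable string buffer and flush conditions by a nested
-- greedy decomposition: an outer loop emits one chunk per iteration, an inner helper takes the
-- maximal prefix of the remaining paragraphs that fits behind the group's head (objective: alternative).

-- ===== PORT A =====
-- shared preprocessing (identical first lines of both Pythons): normalize newlines, strip,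
-- split on blank lines, strip each paragraph, drop empty ones
def pvParas (text : String) : List (List Char) :=
  ((PySem.Chars.splitOn
      (PySem.Chars.strip
        (PySem.Chars.replace (PySem.Chars.replace text.toList ['\r', '\n'] ['\n']) ['\r'] ['\n']))
      ['\n', '\n']).map PySem.Chars.strip).filter (fun p => p ≠ [])

-- the shared heading test `p.startswith("## ") or p.startswith("### ")`
def pvHead (p : List Char) : Bool :=
  PySem.Chars.startswith p ['#', '#', ' '] || PySem.Chars.startswith p ['#', '#', '#', ' ']

-- `is_heading and current.strip(): flush` (state: (chunks, current))
def pvAFlush (st : List (List Char) × List Char) (p : List Char) :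
    List (List Char) × List Char :=
  if pvHead p = true ∧ PySem.Chars.strip st.2 ≠ [] then
    (st.1 ++ [PySem.Chars.strip st.2], ([] : List Char))
  else st

-- `normal size-based grouping`
def pvASize (max_chars : Int) (st : List (List Char) × List Char) (p : List Char) :
    List (List Char) × List Char :=
  if (st.2.length : Int) + (p.length : Int) + 2 > max_chars then
    (if PySem.Chars.strip st.2 ≠ [] then st.1 ++ [PySem.Chars.strip st.2] else st.1, p)
  else
    (st.1, PySem.Chars.strip (st.2 ++ ['\n', '\n'] ++ p))

def pvAStep (max_chars : Int) (st : List (List Char) × List Char) (p : List Char) :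
    List (List Char) × List Char :=
  pvASize max_chars (pvAFlush st p) p

def paragraph_chunk (text : String) (max_chars : Int) : List String :=
  let t := PySem.Chars.strip
    (PySem.Chars.replace (PySem.Chars.replace text.toList ['\r', '\n'] ['\n']) ['\r'] ['\n'])
  if t = [] then []
  else
    let st := (pvParas text).foldl (pvAStep max_chars) ([], [])
    let chunks := if PySem.Chars.strip st.2 ≠ [] then st.1 ++ [PySem.Chars.strip st.2] else st.1
    chunks.map String.ofList

-- ===== PORT B =====
-- `_take_group(paras, length, max_chars)`: maximal fitting prefix and the remainder
def pvTake (m : Int) (len : Int) : List (List Char) → List (List Char) × List (List Char)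
  | [] => ([], [])
  | p :: rest =>
    if pvHead p = true ∨ len + (p.length : Int) + 2 > m then ([], p :: rest)
    else
      let tr := pvTake m (len + (p.length : Int) + 2) rest
      (p :: tr.1, tr.2)

-- needed by pvGroups's termination: the remainder is no longer than the input
theorem pvTake_snd_le (m : Int) (l : List (List Char)) : ∀ len, (pvTake m len l).2.length ≤ l.length := by
  induction l with
  | nil => intro len; simp [pvTake]
  | cons p rest ih =>
    intro len
    unfold pvTake
    split
    · simp
    · simpa using Nat.le_succ_of_le (ih (len + (p.length : Int) + 2))

-- the outer `while rest:` loop of B: one chunk per iteration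
def pvGroups (m : Int) : List (List Char) → List (List Char)
  | [] => []
  | h :: tail =>
    PySem.Chars.join ['\n', '\n'] (h :: (pvTake m (h.length : Int) tail).1) ::
      pvGroups m (pvTake m (h.length : Int) tail).2
termination_by l => l.length
decreasing_by
  have := pvTake_snd_le m tail (h.length : Int)
  simp
  omega

def paragraph_chunk_alt (text : String) (max_chars : Int) : List String :=
  let t := PySem.Chars.strip
    (PySem.Chars.replace (PySem.Chars.replace text.toList ['\r', '\n'] ['\n']) ['\r'] ['\n'])
  if t = [] then []
  else (pvGroups max_chars (pvParas text)).map String.ofList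

-- ===== PRECONDITION & SPEC =====
def Spec_paragraph_chunk (text : String) (max_chars : Int) (out : List String) : Prop := out = paragraph_chunk_alt text max_chars
instance (text : String) (max_chars : Int) (out : List String) : Decidable (Spec_paragraph_chunk text max_chars out) := by unfold Spec_paragraph_chunk; infer_instance

-- ===== CLAIM (what is proved, stated in full; the proofs are below) =====
def Claim_equal_paragraph_chunk : Prop := ∀ (text : String) (max_chars : Int), Dom_paragraph_chunk text max_chars → Spec_paragraph_chunk text max_chars (paragraph_chunk text max_chars)

-- ===== LEMMAS AND PROOFS =====

-- a string with no leading and no trailing whitespace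
def pvStripped (cs : List Char) : Prop :=
  (∀ c, cs.head? = some c → PySem.Chars.isspace c = false) ∧
  (∀ c, cs.getLast? = some c → PySem.Chars.isspace c = false)

theorem pv_dropWhile_eq_self (l : List Char)
    (h : ∀ c, l.head? = some c → PySem.Chars.isspace c = false) :
    l.dropWhile PySem.Chars.isspace = l := by
  cases l with
  | nil => rfl
  | cons a t => rw [List.dropWhile_cons_of_neg]; simp [h a rfl]

theorem pv_getLast?_suffix (a b : List Char) (h : a <:+ b) (ha : a ≠ []) :
    a.getLast? = b.getLast? := by
  obtain ⟨pre, rfl⟩ := h; exact (List.getLast?_append_of_ne_nil pre ha).symm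

theorem pv_rstrip_eq_self (l : List Char)
    (h : ∀ c, l.getLast? = some c → PySem.Chars.isspace c = false) :
    PySem.Chars.rstrip l = l := by
  unfold PySem.Chars.rstrip
  rw [pv_dropWhile_eq_self, List.reverse_reverse]
  intro c hc; exact h c (List.head?_reverse ▸ hc)

theorem pv_strip_eq_self (cs : List Char) (h : pvStripped cs) : PySem.Chars.strip cs = cs := by
  unfold PySem.Chars.strip PySem.Chars.lstrip
  rw [pv_dropWhile_eq_self cs h.1, pv_rstrip_eq_self cs h.2]

theorem pv_stripped_strip (cs : List Char) : pvStripped (PySem.Chars.strip cs) := by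
  unfold PySem.Chars.strip PySem.Chars.rstrip PySem.Chars.lstrip
  set d := List.dropWhile PySem.Chars.isspace (List.dropWhile PySem.Chars.isspace cs).reverse with hd
  by_cases hnil : d = []
  · simp [hnil, pvStripped]
  · constructor
    · intro c hc
      rw [List.head?_reverse] at hc
      rw [pv_getLast?_suffix d _ (List.dropWhile_suffix _) hnil, List.getLast?_reverse] at hc
      have hne : List.dropWhile PySem.Chars.isspace cs ≠ [] := by
        intro h0; rw [h0] at hc; simp at hc
      rw [List.head?_eq_some_head hne] at hc
      have := List.head_dropWhile_not PySem.Chars.isspace hne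
      rw [Option.some_inj] at hc; rw [← hc]; exact this
    · intro c hc
      rw [List.getLast?_reverse, List.head?_eq_some_head hnil, Option.some_inj] at hc
      have := List.head_dropWhile_not PySem.Chars.isspace (l := (List.dropWhile PySem.Chars.isspace cs).reverse) hnil
      rw [← hc]; exact this

theorem pv_strip_nn (p : List Char) (h : pvStripped p) :
    PySem.Chars.strip ('\n' :: '\n' :: p) = p := by
  unfold PySem.Chars.strip PySem.Chars.lstrip
  rw [List.dropWhile_cons_of_pos (by decide), List.dropWhile_cons_of_pos (by decide),
      pv_dropWhile_eq_self p h.1, pv_rstrip_eq_self p h.2]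

theorem pv_stripped_append (a p : List Char) (ha : pvStripped a) (hane : a ≠ [])
    (hp : pvStripped p) (hpne : p ≠ []) : pvStripped (a ++ ['\n', '\n'] ++ p) := by
  constructor
  · intro c hc
    rw [List.append_assoc, List.head?_append_of_ne_nil _ hane] at hc
    exact ha.1 c hc
  · intro c hc
    rw [List.getLast?_append_of_ne_nil _ hpne] at hc
    exact hp.2 c hc

theorem pv_join_append (g : List (List Char)) (p : List Char) (hg : g ≠ []) :
    PySem.Chars.join ['\n', '\n'] (g ++ [p]) =
      PySem.Chars.join ['\n', '\n'] g ++ ['\n', '\n'] ++ p := by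
  induction g with
  | nil => exact absurd rfl hg
  | cons q r ih =>
    cases r with
    | nil => simp [PySem.Chars.join_singleton, PySem.Chars.join_cons_cons]
    | cons r' rs =>
      rw [List.cons_append, List.cons_append, PySem.Chars.join_cons_cons,
          ← List.cons_append, ih (by simp), PySem.Chars.join_cons_cons]
      simp

theorem pv_join_props (g : List (List Char))
    (h : ∀ q ∈ g, pvStripped q ∧ q ≠ []) :
    pvStripped (PySem.Chars.join ['\n', '\n'] g) ∧
      (PySem.Chars.join ['\n', '\n'] g = [] ↔ g = []) := by
  induction g with
  | nil => simp [PySem.Chars.join_nil, pvStripped]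
  | cons q r ih =>
    obtain ⟨hq, hqne⟩ := h q (by simp)
    cases r with
    | nil => simp [PySem.Chars.join_singleton, hq, hqne]
    | cons r' rs =>
      obtain ⟨⟨ihh, ihl⟩, ihe⟩ := ih (fun x hx => h x (List.mem_cons_of_mem _ hx))
      have hrne : PySem.Chars.join ['\n', '\n'] (r' :: rs) ≠ [] := by
        rw [ne_eq, ihe]; simp
      rw [PySem.Chars.join_cons_cons]
      refine ⟨⟨?_, ?_⟩, by simp [hqne]⟩
      · intro c hc
        rw [List.append_assoc, List.head?_append_of_ne_nil _ hqne] at hc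
        exact hq.1 c hc
      · intro c hc
        rw [List.getLast?_append_of_ne_nil _ hrne] at hc
        exact ihl c hc

theorem pv_paras_good (text : String) :
    ∀ p ∈ pvParas text, pvStripped p ∧ p ≠ [] := by
  intro p hp
  unfold pvParas at hp
  obtain ⟨hmem, hne⟩ := List.mem_filter.mp hp
  obtain ⟨x, _, rfl⟩ := List.mem_map.mp hmem
  exact ⟨pv_stripped_strip x, by simpa using hne⟩

-- proof-only abstraction of A's loop, phrased on the current GROUP of paragraphs
def pvRun (m : Int) (g : List (List Char)) : List (List Char) → List (List Char)
  | [] => [PySem.Chars.join ['\n', '\n'] g]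
  | p :: rest =>
    if pvHead p = true ∨
        ((PySem.Chars.join ['\n', '\n'] g).length : Int) + (p.length : Int) + 2 > m then
      PySem.Chars.join ['\n', '\n'] g :: pvRun m [p] rest
    else pvRun m (g ++ [p]) rest

-- the final `if current.strip(): chunks.append(current.strip())` of A
def pvFinal (st : List (List Char) × List Char) : List (List Char) :=
  if PySem.Chars.strip st.2 ≠ [] then st.1 ++ [PySem.Chars.strip st.2] else st.1

theorem pv_strip_nil : PySem.Chars.strip ([] : List Char) = [] := by decide

theorem pv_foldA_run (m : Int) (ps : List (List Char))
    (hps : ∀ p ∈ ps, pvStripped p ∧ p ≠ []) :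
    ∀ chunks g, g ≠ [] → (∀ q ∈ g, pvStripped q ∧ q ≠ []) →
    pvFinal (ps.foldl (pvAStep m) (chunks, PySem.Chars.join ['\n', '\n'] g)) =
      chunks ++ pvRun m g ps := by
  induction ps with
  | nil =>
    intro chunks g hg hgood
    have hjp := pv_join_props g hgood
    have hs := pv_strip_eq_self _ hjp.1
    have hne : PySem.Chars.join ['\n', '\n'] g ≠ [] := by rw [ne_eq, hjp.2]; exact hg
    simp [pvFinal, pvRun, hs, hne]
  | cons p rest ih =>
    intro chunks g hg hgood
    obtain ⟨hp, hpne⟩ := hps p (by simp)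
    have hrest : ∀ q ∈ rest, pvStripped q ∧ q ≠ [] := fun q hq => hps q (List.mem_cons_of_mem _ hq)
    have hjp := pv_join_props g hgood
    have hs : PySem.Chars.strip (PySem.Chars.join ['\n', '\n'] g) = PySem.Chars.join ['\n', '\n'] g :=
      pv_strip_eq_self _ hjp.1
    have hne : PySem.Chars.join ['\n', '\n'] g ≠ [] := by rw [ne_eq, hjp.2]; exact hg
    have hsne : PySem.Chars.strip (PySem.Chars.join ['\n', '\n'] g) ≠ [] := by rw [hs]; exact hne
    have ihp := ih hrest (chunks ++ [PySem.Chars.join ['\n', '\n'] g]) [p] (by simp)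
      (by intro q hq; simp at hq; subst hq; exact ⟨hp, hpne⟩)
    rw [PySem.Chars.join_singleton] at ihp
    rw [List.foldl_cons]
    by_cases hH : pvHead p = true
    · -- heading: A flushes, current becomes p; pvRun's first disjunct holds
      have hfl : pvAFlush (chunks, PySem.Chars.join ['\n', '\n'] g) p =
          (chunks ++ [PySem.Chars.join ['\n', '\n'] g], []) := by
        unfold pvAFlush; rw [if_pos ⟨hH, hsne⟩, hs]
      have hstep : pvAStep m (chunks, PySem.Chars.join ['\n', '\n'] g) p =
          (chunks ++ [PySem.Chars.join ['\n', '\n'] g], p) := by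
        unfold pvAStep; rw [hfl]; unfold pvASize
        by_cases hsz : ((([] : List Char).length : Int) + (p.length : Int) + 2 > m)
        · rw [if_pos hsz]; simp [pv_strip_nil]
        · rw [if_neg hsz]
          simp only [List.nil_append, List.cons_append]
          rw [pv_strip_nn p hp]
      rw [hstep, ihp, List.append_assoc, List.singleton_append]
      conv_rhs => rw [pvRun]
      rw [if_pos (Or.inl hH)]
    · have hfl : pvAFlush (chunks, PySem.Chars.join ['\n', '\n'] g) p =
          (chunks, PySem.Chars.join ['\n', '\n'] g) := by
        unfold pvAFlush; rw [if_neg (fun hc => hH hc.1)]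
      by_cases hsz : ((PySem.Chars.join ['\n', '\n'] g).length : Int) + (p.length : Int) + 2 > m
      · -- overflow: flush, current becomes p
        have hstep : pvAStep m (chunks, PySem.Chars.join ['\n', '\n'] g) p =
            (chunks ++ [PySem.Chars.join ['\n', '\n'] g], p) := by
          unfold pvAStep; rw [hfl]; unfold pvASize
          rw [if_pos hsz, if_pos hsne, hs]
        rw [hstep, ihp, List.append_assoc, List.singleton_append]
        conv_rhs => rw [pvRun]
        rw [if_pos (Or.inr hsz)]
      · -- fits: extend the current group
        have hstep : pvAStep m (chunks, PySem.Chars.join ['\n', '\n'] g) p =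
            (chunks, PySem.Chars.join ['\n', '\n'] (g ++ [p])) := by
          unfold pvAStep; rw [hfl]; unfold pvASize
          rw [if_neg hsz, pv_join_append g p hg,
            pv_strip_eq_self _ (pv_stripped_append _ _ hjp.1 hne hp hpne)]
        rw [hstep, ih hrest chunks (g ++ [p]) (by simp)
          (fun q hq => by
            rcases List.mem_append.mp hq with hq | hq
            · exact hgood q hq
            · simp at hq; subst hq; exact ⟨hp, hpne⟩)]
        conv_rhs => rw [pvRun]
        rw [if_neg (by push Not; exact ⟨fun h => hH h, by omega⟩)]

theorem pv_run_groups (m : Int) (ps : List (List Char)) :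
    ∀ g, g ≠ [] →
    pvRun m g ps =
      PySem.Chars.join ['\n', '\n'] (g ++ (pvTake m ((PySem.Chars.join ['\n', '\n'] g).length : Int) ps).1) ::
        pvGroups m (pvTake m ((PySem.Chars.join ['\n', '\n'] g).length : Int) ps).2 := by
  induction ps with
  | nil => intro g _; simp [pvRun, pvTake, pvGroups]
  | cons p rest ih =>
    intro g hg
    by_cases hC : pvHead p = true ∨
        ((PySem.Chars.join ['\n', '\n'] g).length : Int) + (p.length : Int) + 2 > m
    · have htake : pvTake m ((PySem.Chars.join ['\n', '\n'] g).length : Int) (p :: rest) =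
          ([], p :: rest) := by
        conv_lhs => rw [pvTake]
        rw [if_pos hC]
      conv_lhs => rw [pvRun]
      rw [if_pos hC, htake, List.append_nil]
      conv_rhs => rw [pvGroups]
      rw [ih [p] (by simp), PySem.Chars.join_singleton]
      simp
    · have hlen : ((PySem.Chars.join ['\n', '\n'] (g ++ [p])).length : Int) =
          ((PySem.Chars.join ['\n', '\n'] g).length : Int) + (p.length : Int) + 2 := by
        rw [pv_join_append g p hg]
        simp only [List.length_append, List.length_cons, List.length_nil]
        push_cast; ring
      have htake : pvTake m ((PySem.Chars.join ['\n', '\n'] g).length : Int) (p :: rest) =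
          ((p :: (pvTake m (((PySem.Chars.join ['\n', '\n'] g).length : Int) + (p.length : Int) + 2) rest).1),
            (pvTake m (((PySem.Chars.join ['\n', '\n'] g).length : Int) + (p.length : Int) + 2) rest).2) := by
        conv_lhs => rw [pvTake]
        rw [if_neg hC]
      conv_lhs => rw [pvRun]
      rw [if_neg hC, ih (g ++ [p]) (by simp), hlen, htake]
      simp

-- ===== VERDICT (by name: the statement is the Claim_ definition above) =====
theorem paragraph_chunk_spec : Claim_equal_paragraph_chunk := by
  intro text m _
  unfold Spec_paragraph_chunk paragraph_chunk paragraph_chunk_alt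
  by_cases ht : PySem.Chars.strip
      (PySem.Chars.replace (PySem.Chars.replace text.toList ['\r', '\n'] ['\n']) ['\r'] ['\n']) = []
  · simp [ht]
  · simp only [if_neg ht]
    cases hps : pvParas text with
    | nil => simp [pvGroups, pv_strip_nil]
    | cons p rest =>
      have hgood := pv_paras_good text
      rw [hps] at hgood
      obtain ⟨hp, hpne⟩ := hgood p (by simp)
      have hrest : ∀ q ∈ rest, pvStripped q ∧ q ≠ [] := fun q hq => hgood q (List.mem_cons_of_mem _ hq)
      -- first iteration of A starts the group with p
      have hstep : pvAStep m (([], []) : List (List Char) × List Char) p =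
          ([], PySem.Chars.join ['\n', '\n'] [p]) := by
        have hfl : pvAFlush (([], []) : List (List Char) × List Char) p = ([], []) := by
          unfold pvAFlush; rw [if_neg (fun hc => hc.2 pv_strip_nil)]
        unfold pvAStep; rw [hfl]; unfold pvASize
        rw [PySem.Chars.join_singleton]
        by_cases hsz : ((([] : List Char).length : Int) + (p.length : Int) + 2 > m)
        · rw [if_pos hsz]; simp [pv_strip_nil]
        · rw [if_neg hsz]
          simp only [List.nil_append, List.cons_append]
          rw [pv_strip_nn p hp]
      have hA := pv_foldA_run m rest hrest [] [p] (by simp) (by simp [hp, hpne])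
      have hB := pv_run_groups m rest [p] (by simp)
      rw [PySem.Chars.join_singleton] at hB
      rw [List.foldl_cons, hstep]
      show _ = (pvGroups m (p :: rest)).map String.ofList
      have hgr : pvGroups m (p :: rest) =
          PySem.Chars.join ['\n', '\n'] (p :: (pvTake m ((p.length : Nat) : Int) rest).1) ::
            pvGroups m (pvTake m ((p.length : Nat) : Int) rest).2 := by
        rw [pvGroups]
      have hfin : (if PySem.Chars.strip ((rest.foldl (pvAStep m) ([], PySem.Chars.join ['\n', '\n'] [p])).2) ≠ []
            then (rest.foldl (pvAStep m) ([], PySem.Chars.join ['\n', '\n'] [p])).1 ++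
              [PySem.Chars.strip ((rest.foldl (pvAStep m) ([], PySem.Chars.join ['\n', '\n'] [p])).2)]
            else (rest.foldl (pvAStep m) ([], PySem.Chars.join ['\n', '\n'] [p])).1) =
          pvFinal (rest.foldl (pvAStep m) ([], PySem.Chars.join ['\n', '\n'] [p])) := rfl
  
      rw [hfin, hA, hB, hgr]
      simp
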